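-- pv_equiv track=rewrite | github.com/tanelvo/Anonymiser | name_entity_recognizer.py | remove_smaller_slots
-- ===== SOURCE A (Python) =====
-- from collections import defaultdict
--
-- def remove_smaller_slots(person_array):
--     """
--     Remove slots with the smaller second element if the first element matches any other slot.
--     """
--     for person in person_array:
--         slots = person['slots']
--         unique_first_slots = defaultdict(list)
--
--         # Group slots by their first element
--         for slot in slots:
--             unique_first_slots[slot[0]].append(slot)
--
--         # For each group, keep the slot with the largest second element
--         new_slots = []
--         for first_element, slot_group in unique_first_slots.items():
--             # Sort by second element and keep the one with the largest second element
--             largest_slot = max(slot_group, key=lambda x: x[1])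
--             new_slots.append(largest_slot)
--
--         # Update the person's slots with the filtered slots
--         person['slots'] = new_slots
--
--     return person_array
-- ===== SOURCE B (Python) =====
-- def remove_smaller_slots(person_array):
--     """
--     Remove slots with the smaller second element if the first element matches any other slot.
--     One pass per person: keep a running best slot per first element (strict '>' so the
--     first-encountered slot wins ties, like max); dict insertion order preserves
--     first-appearance order of keys.
--     """
--     for person in person_array:
--         best = {}
--         for slot in person['slots']:
--             cur = best.get(slot[0])
--             if cur is None or slot[1] > cur[1]:
--                 best[slot[0]] = slot
--         person['slots'] = list(best.values())
--     return person_array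
-- ===== Notes on version B (the rewrite author's own statement) =====
-- stated objective: simpler
-- what changed: Replaces the two-phase group-slots-into-lists-then-take-max-of-each-group structure with a single pass keeping a running best slot per first element in one dict.
-- outside the precondition, e.g. on remove_smaller_slots([{'name': []}]): A raises KeyError, B raises KeyError
import Mathlib
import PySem

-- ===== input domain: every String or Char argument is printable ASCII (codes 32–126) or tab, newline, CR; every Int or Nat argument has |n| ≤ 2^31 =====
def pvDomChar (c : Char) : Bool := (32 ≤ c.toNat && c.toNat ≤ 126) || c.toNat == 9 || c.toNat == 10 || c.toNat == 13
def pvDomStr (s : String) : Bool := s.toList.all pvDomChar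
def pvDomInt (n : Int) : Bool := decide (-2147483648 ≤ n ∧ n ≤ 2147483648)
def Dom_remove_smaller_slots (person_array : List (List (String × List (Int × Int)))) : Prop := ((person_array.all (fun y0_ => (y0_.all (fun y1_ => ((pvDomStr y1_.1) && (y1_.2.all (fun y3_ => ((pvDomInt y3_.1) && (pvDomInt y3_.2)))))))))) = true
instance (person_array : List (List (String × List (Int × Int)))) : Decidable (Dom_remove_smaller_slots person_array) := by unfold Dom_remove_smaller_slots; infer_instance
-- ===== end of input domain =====

-- B replaces A's group-into-lists-then-max-per-group with a one-pass running-best-per-key fold (simpler).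
-- Both the Python A and B mutate person_array in place and return it; the equivalence proved is about the return value.


-- ===== PORT A =====
-- max(slot_group, key=lambda x: x[1]) — Python's max returns the FIRST element with maximal key,
-- i.e. a strict-'>' fold from the head; max([]) raises ValueError, but slot groups are never
-- empty, so the [] branch is unreachable in the port's use.
def pyMaxBySnd (g : List (Int × Int)) : Int × Int :=
  match g with
  | [] => (0, 0)
  | h :: t => t.foldl (fun b s => if s.2 > b.2 then s else b) h

def remove_smaller_slots (person_array : List (List (String × List (Int × Int)))) : List (List (String × List (Int × Int))) :=
  person_array.map (fun person =>
    match (PySem.Dict.mk person).get? "slots" with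
    | none => person   -- Python raises KeyError here; excluded by Pre_
    | some slots =>
      -- unique_first_slots[slot[0]].append(slot)  (defaultdict(list))
      let unique_first_slots := slots.foldl
        (fun d slot => PySem.Dict.modify d slot.1 [] (· ++ [slot]))
        (PySem.Dict.empty : PySem.Dict Int (List (Int × Int)))
      -- for _, slot_group in items: new_slots.append(max(slot_group, key=λx. x[1]))
      let new_slots := unique_first_slots.items.map (fun kg => pyMaxBySnd kg.2)
      ((PySem.Dict.mk person).insert "slots" new_slots).items)

-- ===== PORT B =====
def remove_smaller_slots_alt (person_array : List (List (String × List (Int × Int)))) : List (List (String × List (Int × Int))) :=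
  person_array.map (fun person =>
    match (PySem.Dict.mk person).get? "slots" with
    | none => person   -- Python raises KeyError here; excluded by Pre_
    | some slots =>
      let best := slots.foldl
        (fun d slot =>
          match d.get? slot.1 with
          | none => d.insert slot.1 slot
          | some cur => if slot.2 > cur.2 then d.insert slot.1 slot else d)
        (PySem.Dict.empty : PySem.Dict Int (Int × Int))
      ((PySem.Dict.mk person).insert "slots" best.values).items)

-- ===== PRECONDITION & SPEC =====
-- Pre_ excludes exactly the persons without a 'slots' key, on which both Pythons raise KeyError.
def Pre_remove_smaller_slots (person_array : List (List (String × List (Int × Int)))) : Prop :=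
  person_array.all (fun person => ((PySem.Dict.mk person).get? "slots").isSome) = true
instance (person_array : List (List (String × List (Int × Int)))) : Decidable (Pre_remove_smaller_slots person_array) := by unfold Pre_remove_smaller_slots; infer_instance
def pvWitness_remove_smaller_slots : (List (List (String × List (Int × Int)))) :=
  [[("slots", [(1, 2), (1, 5), (2, 3)])], [("slots", [])]]
def Spec_remove_smaller_slots (person_array : List (List (String × List (Int × Int)))) (out : List (List (String × List (Int × Int)))) : Prop := out = remove_smaller_slots_alt person_array
instance (person_array : List (List (String × List (Int × Int)))) (out : List (List (String × List (Int × Int)))) : Decidable (Spec_remove_smaller_slots person_array out) := by unfold Spec_remove_smaller_slots; infer_instance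

-- ===== CLAIM (what is proved, stated in full; the proofs are below) =====
def Claim_equal_remove_smaller_slots : Prop := ∀ (person_array : List (List (String × List (Int × Int)))), Dom_remove_smaller_slots person_array → Pre_remove_smaller_slots person_array → Spec_remove_smaller_slots person_array (remove_smaller_slots person_array)

-- ===== LEMMAS AND PROOFS =====

theorem pyMaxBySnd_append_singleton (g : List (Int × Int)) (s : Int × Int) (h : g ≠ []) :
    pyMaxBySnd (g ++ [s]) = if s.2 > (pyMaxBySnd g).2 then s else pyMaxBySnd g := by
  match g with
  | [] => exact absurd rfl h
  | h0 :: t =>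
    simp [pyMaxBySnd, List.foldl_append]

theorem get?_map_max (G : PySem.Dict Int (List (Int × Int))) (Bd : PySem.Dict Int (Int × Int))
    (hinv : Bd.items = G.items.map (fun kg => (kg.1, pyMaxBySnd kg.2))) (k : Int) :
    Bd.get? k = (G.get? k).map pyMaxBySnd := by
  simp only [PySem.Dict.get?, hinv, List.find?_map]
  cases hfind : List.find? (fun p => p.1 == k) G.items with
  | none => simp [Function.comp_def, hfind]
  | some p => simp [Function.comp_def, hfind]

-- The loop invariant: the running-best dict is the group dict with each group replaced by its max.
theorem loop_inv (slots : List (Int × Int)) (G : PySem.Dict Int (List (Int × Int)))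
    (Bd : PySem.Dict Int (Int × Int))
    (hinv : Bd.items = G.items.map (fun kg => (kg.1, pyMaxBySnd kg.2)))
    (hne : ∀ p ∈ G.items, p.2 ≠ [])
    (hnd : G.keys.Nodup) :
    (slots.foldl
      (fun d slot =>
        match d.get? slot.1 with
        | none => d.insert slot.1 slot
        | some cur => if slot.2 > cur.2 then d.insert slot.1 slot else d) Bd).items
    = ((slots.foldl (fun d slot => PySem.Dict.modify d slot.1 [] (· ++ [slot])) G).items).map
        (fun kg => (kg.1, pyMaxBySnd kg.2)) := by
  induction slots generalizing G Bd with
  | nil => simpa using hinv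
  | cons s rest ih =>
    simp only [List.foldl_cons]
    have hget := get?_map_max G Bd hinv s.1
    have hkeys : Bd.keys = G.keys := by
      simp only [PySem.Dict.keys, hinv, List.map_map]; rfl
    have hcont : Bd.contains s.1 = G.contains s.1 := by
      rw [PySem.Dict.contains_eq_isSome_get?, PySem.Dict.contains_eq_isSome_get?, hget]
      cases G.get? s.1 <;> rfl
    cases hG : G.get? s.1 with
    | none =>
      have hGc : G.contains s.1 = false := by
        rw [PySem.Dict.contains_eq_isSome_get?, hG]; rfl
      have hBc : Bd.contains s.1 = false := by rw [hcont, hGc]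
      have hgetD : G.getD s.1 [] = [] := PySem.Dict.getD_of_not_contains G [] hGc
      have hGitems : (PySem.Dict.modify G s.1 [] (· ++ [s])).items = G.items ++ [(s.1, [s])] := by
        simp [PySem.Dict.modify, hgetD, PySem.Dict.items_insert_of_not_contains G _ hGc]
      have hBitems : (Bd.insert s.1 s).items = Bd.items ++ [(s.1, s)] :=
        PySem.Dict.items_insert_of_not_contains Bd s hBc
      rw [hget, hG]
      simp only [Option.map_none]
      refine ih _ _ ?_ ?_ ?_
      · rw [hBitems, hGitems, hinv]
        simp [pyMaxBySnd]
      · intro p hp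
        rw [hGitems] at hp
        rcases List.mem_append.mp hp with h | h
        · exact hne p h
        · simp at h; simp [h]
      · exact PySem.Dict.nodup_keys_insert _ _ _ hnd
    | some g =>
      have hgne : g ≠ [] := by
        obtain ⟨p, hpfind⟩ : ∃ p, List.find? (fun p => p.1 == s.1) G.items = some p := by
          simp only [PySem.Dict.get?] at hG
          cases hf : List.find? (fun p => p.1 == s.1) G.items with
          | none => rw [hf] at hG; simp at hG
          | some p => exact ⟨p, rfl⟩
        have hpsnd : p.2 = g := by
          simp only [PySem.Dict.get?, hpfind] at hG; simpa using hG
        have hpmem := List.mem_of_find?_eq_some hpfind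
        rw [← hpsnd]; exact hne p hpmem
      have hGc : G.contains s.1 = true := by
        rw [PySem.Dict.contains_eq_isSome_get?, hG]; rfl
      have hBc : Bd.contains s.1 = true := by rw [hcont, hGc]
      have hgetD : G.getD s.1 [] = g := PySem.Dict.getD_of_get?_eq_some G [] hG
      have hGitems : (PySem.Dict.modify G s.1 [] (· ++ [s])).items
          = G.items.map (fun p => if p.1 == s.1 then (s.1, g ++ [s]) else p) := by
        simp [PySem.Dict.modify, hgetD, PySem.Dict.items_insert_of_contains G _ hGc]
      have hmax := pyMaxBySnd_append_singleton g s hgne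
      rw [hget, hG]
      simp only [Option.map_some]
      by_cases hlt : s.2 > (pyMaxBySnd g).2
      · simp only [if_pos hlt]
        refine ih _ _ ?_ ?_ ?_
        · rw [PySem.Dict.items_insert_of_contains Bd s hBc, hGitems, hinv, List.map_map, List.map_map]
          refine List.map_congr_left ?_
          intro p _
          by_cases hpk : p.1 == s.1
          · simp only [Function.comp_apply, hpk, if_true, hmax, if_pos hlt]
          · have hpk' : ¬ p.1 = s.1 := by simpa using hpk
            simp [hpk']
        · intro p hp
          rw [hGitems] at hp
          obtain ⟨q, hq, hqp⟩ := List.mem_map.mp hp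
          by_cases hqk : q.1 == s.1
          · rw [if_pos hqk] at hqp; rw [← hqp]; simp
          · rw [if_neg hqk] at hqp; rw [← hqp]; exact hne q hq
        · exact PySem.Dict.nodup_keys_insert _ _ _ hnd
      · simp only [if_neg hlt]
        refine ih _ _ ?_ ?_ ?_
        · rw [hGitems, hinv, List.map_map]
          refine List.map_congr_left ?_
          intro p hp
          by_cases hpk : p.1 == s.1
          · have hpk' : p.1 = s.1 := by simpa using hpk
            have hpg : p.2 = g := by
              have := PySem.Dict.get?_of_mem_items (d := G) (k := p.1) (v := p.2)
                (by simpa using hp) hnd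
              rw [hpk', hG] at this
              exact (Option.some.injEq _ _ ▸ this).symm
            simp [hmax, if_neg hlt, hpk', hpg]
          · have hpk' : ¬ p.1 = s.1 := by simpa using hpk
            simp [hpk']
        · intro p hp
          rw [hGitems] at hp
          obtain ⟨q, hq, hqp⟩ := List.mem_map.mp hp
          by_cases hqk : q.1 == s.1
          · rw [if_pos hqk] at hqp; rw [← hqp]; simp [hgne]
          · rw [if_neg hqk] at hqp; rw [← hqp]; exact hne q hq
        · exact PySem.Dict.nodup_keys_insert _ _ _ hnd

-- ===== VERDICT (by name: the statement is the Claim_ definition above) =====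
theorem remove_smaller_slots_spec : Claim_equal_remove_smaller_slots := by
  intro pa hdom hpre
  unfold Spec_remove_smaller_slots remove_smaller_slots remove_smaller_slots_alt
  refine List.map_congr_left ?_
  intro person hmem
  cases hs : (PySem.Dict.mk person).get? "slots" with
  | none => rfl
  | some slots =>
    simp only []
    have hcore := loop_inv slots PySem.Dict.empty PySem.Dict.empty (by rfl)
      (by intro p hp; simp [PySem.Dict.empty] at hp) (by simp [PySem.Dict.empty, PySem.Dict.keys])
    have hvals : (slots.foldl
        (fun d slot =>
          match d.get? slot.1 with
          | none => d.insert slot.1 slot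
          | some cur => if slot.2 > cur.2 then d.insert slot.1 slot else d)
        (PySem.Dict.empty : PySem.Dict Int (Int × Int))).values
      = ((slots.foldl (fun d slot => PySem.Dict.modify d slot.1 [] (· ++ [slot]))
          (PySem.Dict.empty : PySem.Dict Int (List (Int × Int)))).items).map
          (fun kg => pyMaxBySnd kg.2) := by
      rw [PySem.Dict.values, hcore, List.map_map]
      rfl
    rw [hvals]
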